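-- pv_equiv track=rewrite | github.com/ponpaku/fulltext-search-server | web_server.py | split_excel_rows
-- ===== SOURCE A (Python) =====
-- from typing import Dict, List, Tuple
--
-- def split_excel_rows(rows: List[Tuple[str, int, str]], rows_per_page: int = 40) -> Dict[str, str]:
--     pages: Dict[str, str] = {}
--     by_sheet: Dict[str, List[Tuple[int, str]]] = {}
--     for sheet, row_idx, text in rows:
--         by_sheet.setdefault(sheet, []).append((row_idx, text))
--
--     for sheet, sheet_rows in by_sheet.items():
--         sheet_rows.sort(key=lambda x: x[0])
--         for i in range(0, len(sheet_rows), rows_per_page):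
--             chunk = sheet_rows[i : i + rows_per_page]
--             start_row = chunk[0][0]
--             end_row = chunk[-1][0]
--             label = f"{sheet} 行 {start_row}-{end_row}"
--             pages[label] = "\n".join(text for _, text in chunk).strip()
--     return pages
-- ===== SOURCE B (Python) =====
-- from typing import Dict, List, Tuple
--
-- def split_excel_rows(rows: List[Tuple[str, int, str]], rows_per_page: int = 40) -> Dict[str, str]:
--     pages: Dict[str, str] = {}
--     for sheet in dict.fromkeys(s for s, _, _ in rows):
--         block = sorted(((r, t) for s, r, t in rows if s == sheet), key=lambda p: p[0])
--         while block:
--             chunk, block = block[:rows_per_page], block[rows_per_page:]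
--             label = f"{sheet} 行 {chunk[0][0]}-{chunk[-1][0]}"
--             pages[label] = "\n".join(t for _, t in chunk).strip()
--     return pages
-- ===== Notes on version B (the rewrite author's own statement) =====
-- stated objective: simpler
-- what changed: Replaces the dict-of-lists grouping pass plus range-indexed slicing with a direct loop over the distinct sheet names (dict.fromkeys) that filters and sorts each sheet's rows and chunks them with a destructive while-loop split, needing no intermediate by_sheet dictionary.
-- outside the precondition, e.g. on split_excel_rows([('S', 1, 'a')], 0): A raises ValueError, B raises IndexError; on split_excel_rows([('S', 1, 'a')], -1): A returns {}, B raises IndexError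
import Mathlib
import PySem

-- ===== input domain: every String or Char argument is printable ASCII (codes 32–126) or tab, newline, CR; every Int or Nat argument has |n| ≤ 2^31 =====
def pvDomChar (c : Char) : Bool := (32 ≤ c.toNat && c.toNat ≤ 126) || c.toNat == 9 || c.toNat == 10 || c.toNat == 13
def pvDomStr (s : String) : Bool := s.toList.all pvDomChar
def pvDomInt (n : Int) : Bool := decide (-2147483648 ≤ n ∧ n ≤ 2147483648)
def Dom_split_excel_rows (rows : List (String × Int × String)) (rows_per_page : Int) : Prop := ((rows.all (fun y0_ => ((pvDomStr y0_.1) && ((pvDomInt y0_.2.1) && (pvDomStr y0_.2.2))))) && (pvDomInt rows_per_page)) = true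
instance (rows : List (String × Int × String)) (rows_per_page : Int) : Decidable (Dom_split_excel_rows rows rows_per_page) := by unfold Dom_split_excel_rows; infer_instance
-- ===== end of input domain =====

-- B replaces A's dict-of-lists grouping pass and range-indexed slicing with a loop over the
-- distinct sheet names that filters/sorts each sheet's rows and chunks them with a while-loop
-- split (objective: simpler — no intermediate by_sheet dictionary).

-- ===== PORT A =====
def split_excel_rows (rows : List (String × Int × String)) (rows_per_page : Int) : List (String × String) :=
  let by_sheet : PySem.Dict String (List (Int × String)) :=
    rows.foldl (fun d x => d.modify x.1 [] (fun v => v ++ [(x.2.1, x.2.2)])) PySem.Dict.empty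
  let pages : PySem.Dict String String :=
    by_sheet.items.foldl (fun pages it =>
      let sheet_rows := PySem.List.sorted it.2 (fun x => x.1)
      (PySem.List.pyRange 0 (sheet_rows.length : Int) rows_per_page).foldl (fun pages i =>
        let chunk := PySem.List.slice sheet_rows (some i) (some (i + rows_per_page))
        let start_row := (PySem.List.pyGetD chunk 0 ((0 : Int), "")).1
        let end_row := (PySem.List.pyGetD chunk (-1) ((0 : Int), "")).1
        let label := it.1 ++ " 行 " ++ PySem.Int.toStr start_row ++ "-" ++ PySem.Int.toStr end_row
        pages.insert label (PySem.Str.strip (PySem.Str.join "\n" (chunk.map (fun p => p.2))))) pages)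
      PySem.Dict.empty
  pages.items

-- ===== PORT B =====
-- the 'while block:' loop of Source B; fuel = |block| bounds the iteration count (each pass with
-- rows_per_page ≥ 1, the Pre_ case, strictly shortens block, so the fuel is never exhausted)
def chunkPagesB (sheet : String) (rows_per_page : Int) :
    Nat → List (Int × String) → PySem.Dict String String → PySem.Dict String String
  | 0, _, pages => pages
  | fuel + 1, block, pages =>
    if block.isEmpty then pages
    else
      let chunk := PySem.List.slice block none (some rows_per_page)
      let rest := PySem.List.slice block (some rows_per_page) none
      let label := sheet ++ " 行 " ++ PySem.Int.toStr (PySem.List.pyGetD chunk 0 ((0 : Int), "")).1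
          ++ "-" ++ PySem.Int.toStr (PySem.List.pyGetD chunk (-1) ((0 : Int), "")).1
      chunkPagesB sheet rows_per_page fuel rest
        (pages.insert label (PySem.Str.strip (PySem.Str.join "\n" (chunk.map (fun p => p.2)))))

def split_excel_rows_alt (rows : List (String × Int × String)) (rows_per_page : Int) : List (String × String) :=
  ((PySem.List.dedup (rows.map (fun x => x.1))).foldl (fun pages sheet =>
      let block := PySem.List.sorted
        ((rows.filter (fun x => x.1 == sheet)).map (fun x => (x.2.1, x.2.2))) (fun x => x.1)
      chunkPagesB sheet rows_per_page block.length block pages)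
    PySem.Dict.empty).items

-- ===== PRECONDITION & SPEC =====
-- Pre_ excludes non-positive rows_per_page when rows is nonempty: there A raises ValueError
-- (rows_per_page = 0, range with step 0) or accidentally returns an empty dict (negative
-- rows_per_page makes range's step negative so no chunk is ever produced), while B's
-- while-loop chunking raises IndexError on the empty slice it produces.
def Pre_split_excel_rows (rows : List (String × Int × String)) (rows_per_page : Int) : Prop :=
  rows = [] ∨ 1 ≤ rows_per_page
instance (rows : List (String × Int × String)) (rows_per_page : Int) : Decidable (Pre_split_excel_rows rows rows_per_page) := by unfold Pre_split_excel_rows; infer_instance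
def pvWitness_split_excel_rows : (List (String × Int × String)) × Int :=
  ([("S", 1, "a"), ("S", 2, "b"), ("T", 5, "c")], 2)

def Spec_split_excel_rows (rows : List (String × Int × String)) (rows_per_page : Int) (out : List (String × String)) : Prop := out = split_excel_rows_alt rows rows_per_page
instance (rows : List (String × Int × String)) (rows_per_page : Int) (out : List (String × String)) : Decidable (Spec_split_excel_rows rows rows_per_page out) := by unfold Spec_split_excel_rows; infer_instance

-- ===== CLAIM (what is proved, stated in full; the proofs are below) =====
def Claim_equal_split_excel_rows : Prop := ∀ (rows : List (String × Int × String)) (rows_per_page : Int), Dom_split_excel_rows rows rows_per_page → Pre_split_excel_rows rows rows_per_page → Spec_split_excel_rows rows rows_per_page (split_excel_rows rows rows_per_page)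

-- ===== LEMMAS AND PROOFS =====

-- range with positive step is empty when the interval is
theorem pyRange_pos_nil (a b k : Int) (hk : 0 < k) (hab : b ≤ a) :
    PySem.List.pyRange a b k = [] := by
  rw [PySem.List.pyRange_of_pos a b hk]
  simp [show ¬ a < b by omega]

-- peel the first index off a positive-step range
theorem pyRange_pos_cons (a b k : Int) (hk : 0 < k) (hab : a < b) :
    PySem.List.pyRange a b k = a :: PySem.List.pyRange (a + k) b k := by
  rw [PySem.List.pyRange_of_pos a b hk, PySem.List.pyRange_of_pos (a + k) b hk]
  by_cases h : a + k < b
  · simp only [if_pos hab, if_pos h]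
    have hM : ((b - a + k - 1) / k).toNat = ((b - (a + k) + k - 1) / k).toNat + 1 := by
      have : b - a + k - 1 = (b - (a + k) + k - 1) + 1 * k := by ring
      rw [this, Int.add_mul_ediv_right _ _ (by omega)]
      have h0 : 0 ≤ (b - (a + k) + k - 1) / k := by
        apply Int.ediv_nonneg <;> omega
      omega
    rw [hM, List.range_succ_eq_map, List.map_cons, List.map_map]
    simp only [Nat.cast_zero, mul_zero, add_zero, List.cons.injEq, true_and]
    apply List.map_congr_left
    intro x _
    simp only [Function.comp, Nat.succ_eq_add_one]
    push_cast
    ring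
  · simp only [if_pos hab, if_neg h]
    have hM : ((b - a + k - 1) / k).toNat = 1 := by
      have h1 : (b - a + k - 1) / k = 1 := by
        have he : b - a + k - 1 = (b - a - 1) + 1 * k := by ring
        rw [he, Int.add_mul_ediv_right _ _ (by omega), Int.ediv_eq_zero_of_lt (by omega) (by omega)]
        ring
      omega
    rw [hM]
    norm_num

-- shifting a positive-step range
theorem pyRange_pos_shift (a b c k : Int) (hk : 0 < k) :
    PySem.List.pyRange (a + c) (b + c) k = (PySem.List.pyRange a b k).map (fun x => x + c) := by
  rw [PySem.List.pyRange_of_pos a b hk, PySem.List.pyRange_of_pos (a + c) (b + c) hk]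
  have h1 : (a + c < b + c) = (a < b) := by
    simp only [eq_iff_iff]; omega
  simp only [h1]
  have : b + c - (a + c) + k - 1 = b - a + k - 1 := by ring
  rw [this, List.map_map]
  apply List.map_congr_left
  intro x _
  simp only [Function.comp]
  ring

-- A's grouping dict, as an items list: distinct sheets in first-occurrence order, each with
-- its filtered rows
theorem items_group (rows : List (String × Int × String)) :
    (rows.foldl (fun d x => d.modify x.1 [] (fun v => v ++ [(x.2.1, x.2.2)])) PySem.Dict.empty).items
    = (PySem.List.dedup (rows.map (fun x => x.1))).map
        (fun s => (s, (rows.filter (fun x => x.1 == s)).map (fun x => (x.2.1, x.2.2)))) := by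
  have hnodup : (rows.foldl (fun d x => d.modify x.1 [] (fun v => v ++ [(x.2.1, x.2.2)]))
      PySem.Dict.empty).keys.Nodup := by
    exact PySem.Dict.nodup_keys_foldl_modify_key rows (fun x => x.1) []
      (fun _ x v => v ++ [(x.2.1, x.2.2)]) PySem.Dict.empty (by simp [PySem.Dict.keys_empty])
  have hkeys : (rows.foldl (fun d x => d.modify x.1 [] (fun v => v ++ [(x.2.1, x.2.2)]))
      PySem.Dict.empty).keys = PySem.List.dedup (rows.map (fun x => x.1)) := by
    rw [PySem.Dict.keys_foldl_modify_key rows (fun x => x.1) []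
      (fun _ x v => v ++ [(x.2.1, x.2.2)]) PySem.Dict.empty, PySem.Dict.keys_empty,
      PySem.List.dedup_eq_ofList]
    rfl
  rw [PySem.Dict.items_eq_map_keys _ hnodup [], hkeys]
  apply List.map_congr_left
  intro s _
  have hfold : rows.foldl (fun d x => d.modify x.1 [] (fun v => v ++ [(x.2.1, x.2.2)]))
      PySem.Dict.empty
      = (rows.map (fun x => (x.1, (x.2.1, x.2.2)))).foldl
          (fun d p => d.modify p.1 [] (fun v => v ++ [p.2])) PySem.Dict.empty := by
    rw [List.foldl_map]
  rw [hfold, PySem.Dict.getD_foldl_modify_append, List.filter_map, List.map_map]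
  rfl

-- the crux: A's range-indexed slicing over a sheet's sorted rows emits exactly the pages of
-- B's while-loop chunking (rows_per_page ≥ 1; fuel ≥ |L| suffices)
theorem chunk_eq (sheet : String) (k : Int) (hk : 1 ≤ k) :
    ∀ (n : Nat) (L : List (Int × String)), L.length = n → ∀ (fuel : Nat), L.length ≤ fuel →
    ∀ (pages : PySem.Dict String String),
    (PySem.List.pyRange 0 (L.length : Int) k).foldl (fun pages i =>
        let chunk := PySem.List.slice L (some i) (some (i + k))
        let start_row := (PySem.List.pyGetD chunk 0 ((0 : Int), "")).1
        let end_row := (PySem.List.pyGetD chunk (-1) ((0 : Int), "")).1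
        let label := sheet ++ " 行 " ++ PySem.Int.toStr start_row ++ "-" ++ PySem.Int.toStr end_row
        pages.insert label (PySem.Str.strip (PySem.Str.join "\n" (chunk.map (fun p => p.2))))) pages
      = chunkPagesB sheet k fuel L pages := by
  intro n
  induction n using Nat.strong_induction_on with
  | _ n IH =>
    intro L hL fuel hfuel pages
    match L, fuel with
    | [], 0 => simp [pyRange_pos_nil 0 0 k (by omega) le_rfl, chunkPagesB]
    | [], f + 1 => simp [pyRange_pos_nil 0 0 k (by omega) le_rfl, chunkPagesB]
    | hd :: tl, 0 => simp at hfuel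
    | hd :: tl, f + 1 =>
      have hlen : (0 : Int) < ((hd :: tl).length : Int) := by
        simp only [List.length_cons]; omega
      rw [pyRange_pos_cons 0 _ k (by omega) hlen, List.foldl_cons, chunkPagesB]
      rw [if_neg (by simp)]
      simp only [PySem.List.slice_zero_start, zero_add]
      by_cases hbig : ((hd :: tl).length : Int) ≤ k
      · rw [pyRange_pos_nil k _ k (by omega) hbig, List.foldl_nil]
        have hrest : PySem.List.slice (hd :: tl) (some k) none = [] := by
          rw [PySem.List.slice_from _ (by omega)]
          apply List.drop_eq_nil_of_le
          omega
        rw [hrest]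
        cases f <;> simp [chunkPagesB]
      · rw [not_le] at hbig
        have hrest : PySem.List.slice (hd :: tl) (some k) none = (hd :: tl).drop k.toNat :=
          PySem.List.slice_from _ (by omega)
        have hrlen : (((hd :: tl).drop k.toNat).length : Int) = ((hd :: tl).length : Int) - k := by
          rw [List.length_drop]; omega
        have hshift : PySem.List.pyRange k ((hd :: tl).length : Int) k
            = (PySem.List.pyRange 0 (((hd :: tl).length : Int) - k) k).map (fun x => x + k) := by
          have := pyRange_pos_shift 0 (((hd :: tl).length : Int) - k) k k (by omega)
          simpa using this
        rw [hshift, List.foldl_map, hrest]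
        have hcong : ∀ (acc : PySem.Dict String String),
            ∀ j ∈ PySem.List.pyRange 0 (((hd :: tl).length : Int) - k) k,
            PySem.List.slice (hd :: tl) (some (j + k)) (some (j + k + k))
              = PySem.List.slice ((hd :: tl).drop k.toNat) (some j) (some (j + k)) := by
          intro _ j hj
          have hj0 : 0 ≤ j := ((PySem.List.mem_pyRange_iff_of_pos (by omega) j).1 hj).1
          rw [PySem.List.slice_toNat _ (by omega) (by omega),
            PySem.List.slice_toNat _ (by omega) (by omega), List.drop_drop]
          rw [show (j + k).toNat = k.toNat + j.toNat by omega]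
          congr 1
          omega
        rw [PySem.List.foldl_congr_mem _ _ (fun pages j =>
            let chunk := PySem.List.slice ((hd :: tl).drop k.toNat) (some j) (some (j + k))
            let start_row := (PySem.List.pyGetD chunk 0 ((0 : Int), "")).1
            let end_row := (PySem.List.pyGetD chunk (-1) ((0 : Int), "")).1
            let label := sheet ++ " 行 " ++ PySem.Int.toStr start_row ++ "-"
              ++ PySem.Int.toStr end_row
            pages.insert label (PySem.Str.strip (PySem.Str.join "\n"
              (chunk.map (fun p => p.2))))) _
          (by intro acc j hj; simp only [hcong acc j hj])]
        rw [show (((hd :: tl).length : Int) - k)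
            = ((((hd :: tl).drop k.toNat).length : Int)) by
          simp only [List.length_drop]; omega]
        exact IH ((hd :: tl).drop k.toNat).length
          (by simp only [List.length_drop] at *; omega) _ rfl f
          (by simp only [List.length_drop, List.length_cons] at *; omega) _

-- ===== VERDICT (by name: the statement is the Claim_ definition above) =====
theorem split_excel_rows_spec : Claim_equal_split_excel_rows := by
  intro rows rpp _ hpre
  unfold Spec_split_excel_rows
  rcases hpre with h | hk
  · subst h; rfl
  · simp only [split_excel_rows, split_excel_rows_alt, items_group, List.foldl_map]
    congr 1
    apply PySem.List.foldl_congr_mem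
    intro pages s _
    exact chunk_eq s rpp hk _ _ rfl _ le_rfl pages
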